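-- pv_equiv track=rewrite | github.com/Bklyn/adventofcode | 2017/11.py | move_hex
-- ===== SOURCE A (Python) =====
-- HexSteps = { 'n': (0, -1), 'ne': (1, -1), 'se': (1, 0),
--              's': (0,  1), 'sw': (-1, 1), 'nw': (-1, 0) }
--
-- def move_hex(point, steps):
--     q, r = point
--     if type(steps) is str:
--         steps = steps.strip ().split (',')
--     for step in steps:
--         dq, dr = HexSteps[step]
--         q, r = q+dq, r+dr
--     return (q, r)
-- ===== SOURCE B (Python) =====
-- HexSteps = { 'n': (0, -1), 'ne': (1, -1), 'se': (1, 0),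
--              's': (0,  1), 'sw': (-1, 1), 'nw': (-1, 0) }
--
-- def move_hex(point, steps):
--     if type(steps) is str:
--         steps = steps.strip().split(',')
--     counts = {}
--     for step in steps:
--         counts[step] = counts.get(step, 0) + 1
--     dq = sum(HexSteps[s][0] * n for s, n in counts.items())
--     dr = sum(HexSteps[s][1] * n for s, n in counts.items())
--     return (point[0] + dq, point[1] + dr)
-- ===== Notes on version B (the rewrite author's own statement) =====
-- stated objective: alternative
-- what changed: B first tallies the steps into a dict of counts in one pass, then does a single weighted pass over the distinct step kinds (q += dq*n), instead of A's per-step accumulation over the raw sequence.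
import Mathlib
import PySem

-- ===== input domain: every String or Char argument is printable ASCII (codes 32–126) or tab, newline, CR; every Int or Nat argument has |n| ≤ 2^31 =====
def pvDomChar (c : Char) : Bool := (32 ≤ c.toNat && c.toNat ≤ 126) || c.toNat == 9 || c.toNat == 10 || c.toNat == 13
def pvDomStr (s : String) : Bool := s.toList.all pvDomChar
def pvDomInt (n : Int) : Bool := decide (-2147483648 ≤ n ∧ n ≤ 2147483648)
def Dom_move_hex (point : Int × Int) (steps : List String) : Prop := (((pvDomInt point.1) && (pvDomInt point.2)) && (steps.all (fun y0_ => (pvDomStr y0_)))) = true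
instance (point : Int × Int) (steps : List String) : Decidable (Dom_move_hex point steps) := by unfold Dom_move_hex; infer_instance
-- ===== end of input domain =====

-- B tallies the steps into a dict of counts first and then adds each hex delta once, weighted
-- by its count, instead of A's step-by-step accumulation (objective: alternative decomposition).


-- ===== PORT A =====
-- the module-level HexSteps dict, shared by both Pythons
def pvHexSteps : PySem.Dict String (Int × Int) :=
  PySem.Dict.ofList [("n", (0, -1)), ("ne", (1, -1)), ("se", (1, 0)),
                     ("s", (0, 1)), ("sw", (-1, 1)), ("nw", (-1, 0))]

-- Literal port of A. The `type(steps) is str` branch cannot fire (steps : List String).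
-- `none` from the dict lookup is Python's KeyError: excluded by Pre_move_hex.
def move_hex (point : Int × Int) (steps : List String) : Int × Int :=
  steps.foldl
    (fun qr step =>
      match pvHexSteps.get? step with
      | some (dq, dr) => (qr.1 + dq, qr.2 + dr)
      | none => qr)
    point

-- ===== PORT B =====
-- Literal port of Source B: build the count dict in one pass, then two weighted sums over its items.
-- `none` from the dict lookup is Python's KeyError: excluded by Pre_move_hex.
def move_hex_alt (point : Int × Int) (steps : List String) : Int × Int :=
  let counts : PySem.Dict String Int :=
    steps.foldl (fun d step => d.insert step (d.getD step 0 + 1)) PySem.Dict.empty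
  let dq := (counts.items.map (fun kn =>
    match pvHexSteps.get? kn.1 with | some d => d.1 * kn.2 | none => 0)).sum
  let dr := (counts.items.map (fun kn =>
    match pvHexSteps.get? kn.1 with | some d => d.2 * kn.2 | none => 0)).sum
  (point.1 + dq, point.2 + dr)

-- ===== PRECONDITION & SPEC =====
-- Pre_ excludes exactly the inputs where A raises KeyError: a step not among the six hex directions.
def Pre_move_hex (point : Int × Int) (steps : List String) : Prop :=
  (steps.all (fun s => s == "n" || s == "ne" || s == "se" || s == "s" || s == "sw" || s == "nw")) = true
instance (point : Int × Int) (steps : List String) : Decidable (Pre_move_hex point steps) := by unfold Pre_move_hex; infer_instance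
def pvWitness_move_hex : (Int × Int) × List String := ((2, -3), ["n", "ne", "ne", "sw"])

def Spec_move_hex (point : Int × Int) (steps : List String) (out : Int × Int) : Prop := out = move_hex_alt point steps
instance (point : Int × Int) (steps : List String) (out : Int × Int) : Decidable (Spec_move_hex point steps out) := by unfold Spec_move_hex; infer_instance

-- ===== CLAIM (what is proved, stated in full; the proofs are below) =====
def Claim_equal_move_hex : Prop := ∀ (point : Int × Int) (steps : List String), Dom_move_hex point steps → Pre_move_hex point steps → Spec_move_hex point steps (move_hex point steps)

-- ===== LEMMAS AND PROOFS =====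

-- the delta of a valid step (total version of the dict lookup)
def pvDelta (s : String) : Int × Int := pvHexSteps.getD s (0, 0)

theorem pvGet_of_valid (s : String)
    (h : (s == "n" || s == "ne" || s == "se" || s == "s" || s == "sw" || s == "nw") = true) :
    pvHexSteps.get? s = some (pvDelta s) := by
  simp only [Bool.or_eq_true, beq_iff_eq] at h
  rcases h with ((((h | h) | h) | h) | h) | h <;> subst h <;> decide

-- componentwise accumulation over a list is init + the sum of the deltas
theorem pvFoldPair (f : String → Int × Int) (l : List String) (q r : Int) :
    List.foldl (fun (qr : Int × Int) x => (qr.1 + (f x).1, qr.2 + (f x).2)) (q, r) l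
    = (q + (l.map (fun x => (f x).1)).sum, r + (l.map (fun x => (f x).2)).sum) := by
  induction l generalizing q r with
  | nil => simp
  | cons x xs ih => simp [ih, add_assoc]

-- summing g over the distinct elements weighted by multiplicity equals summing g over the list
theorem pvSumCount (g : String → Int) (xs : List String) :
    ((PySem.Set.ofList xs).map (fun k => g k * (List.count k xs : Int))).sum
    = (xs.map g).sum := by
  have hnd : (PySem.Set.ofList xs : List String).Nodup := by
    rw [← PySem.List.dedup_eq_ofList]; exact PySem.List.nodup_dedup xs
  have hfs : (PySem.Set.ofList xs : List String).toFinset = xs.toFinset := by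
    ext y; simp [PySem.Set.mem_ofList]
  rw [← List.sum_toFinset _ hnd, hfs, Finset.sum_list_map_count]
  refine Finset.sum_congr rfl (fun m hm => ?_)
  rw [List.mem_toFinset] at hm
  push_cast [nsmul_eq_mul]
  ring

theorem move_hex_spec : Claim_equal_move_hex := by
  intro point steps _ hpre
  simp only [Spec_move_hex, move_hex, move_hex_alt]
  obtain ⟨q, r⟩ := point
  unfold Pre_move_hex at hpre
  rw [List.all_eq_true] at hpre
  -- A side: replace the lookup by the total delta, then sum
  have hA :
      List.foldl (fun (qr : Int × Int) step =>
        match pvHexSteps.get? step with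
        | some (dq, dr) => (qr.1 + dq, qr.2 + dr)
        | none => qr) (q, r) steps
      = List.foldl (fun (qr : Int × Int) x => (qr.1 + (pvDelta x).1, qr.2 + (pvDelta x).2)) (q, r) steps := by
    apply PySem.List.foldl_congr_mem
    intro acc x hx
    rw [pvGet_of_valid x (hpre x hx)]
  -- B side: the first pass is Counter(steps); its items are the distinct steps with counts
  have hC : steps.foldl (fun d step => d.insert step (d.getD step 0 + 1)) PySem.Dict.empty
      = PySem.Dict.counter steps := PySem.Dict.foldl_insert_getD_add_one_eq_counter steps
  have hmap : ∀ (pr : Int × Int → Int),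
      ((PySem.Dict.counter steps).items.map (fun kn =>
        match pvHexSteps.get? kn.1 with | some d => pr d * kn.2 | none => 0)).sum
      = ((PySem.Set.ofList steps).map (fun k => pr (pvDelta k) * (List.count k steps : Int))).sum := by
    intro pr
    rw [PySem.Dict.items_counter, List.map_map]
    congr 1
    apply List.map_congr_left
    intro x hx
    rw [PySem.Set.mem_ofList] at hx
    simp only [Function.comp_apply]
    rw [pvGet_of_valid x (hpre x hx)]
  rw [hA, hC, hmap (fun d => d.1), hmap (fun d => d.2),
      pvFoldPair (fun x => pvDelta x) steps q r,
      pvSumCount (fun x => (pvDelta x).1) steps, pvSumCount (fun x => (pvDelta x).2) steps]
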